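-- pv_equiv track=rewrite | github.com/PietroChiapparicci/ASSIGNMENT_2 | cons.py | cons
-- ===== SOURCE A (Python) =====
-- def cons(dna_data):
--     consensus=[]
--     seq_lenght=len(dna_data[0])
--     for i in range(seq_lenght):
--         idxA=0
--         idxG=0
--         idxT=0
--         idxC=0
--         for seq in dna_data:
--             if seq[i]=='A':
--                 idxA+=1
--             elif seq[i]=='C':
--                 idxC+=1
--             elif seq[i]=='G':
--                 idxG+=1
--             elif seq[i]=='T':
--                 idxT+=1
--         max_count=max(idxA,idxC,idxG,idxT)
--
--         if max_count==idxA: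
--             consensus.append('A')
--         elif max_count==idxC:
--             consensus.append('C')
--         elif max_count==idxG:
--             consensus.append('G')
--         else:
--             consensus.append('T')
--     return ''.join(consensus)
-- ===== SOURCE B (Python) =====
-- def cons(dna_data):
--     letters = []
--     for i in range(len(dna_data[0])):
--         col = sorted(seq[i] for seq in dna_data if seq[i] in "ACGT")
--         letters.append(_mode(col))
--     return ''.join(letters)
--
-- def _mode(col):
--     # col is sorted, so equal letters are contiguous; scan runs, keep the first
--     # longest run (strict '>'), which realises the A>C>G>T tie priority.
--     best = 'A'
--     best_run = 0
--     cur = None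
--     cur_run = 0
--     for c in col:
--         if c == cur:
--             cur_run += 1
--         else:
--             cur = c
--             cur_run = 1
--         if cur_run > best_run:
--             best = c
--             best_run = cur_run
--     return best
-- ===== Notes on version B (the rewrite author's own statement) =====
-- stated objective: faster
-- what changed: A keeps four explicit counters per column and picks the argmax with an if/elif chain; B sorts each column's letter list and takes the consensus as the first longest run of a sorted-runs scan (sort-then-scan mode), the alphabetical order A<C<G<T realising A's tie priority with no counters at all.
import Mathlib
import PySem

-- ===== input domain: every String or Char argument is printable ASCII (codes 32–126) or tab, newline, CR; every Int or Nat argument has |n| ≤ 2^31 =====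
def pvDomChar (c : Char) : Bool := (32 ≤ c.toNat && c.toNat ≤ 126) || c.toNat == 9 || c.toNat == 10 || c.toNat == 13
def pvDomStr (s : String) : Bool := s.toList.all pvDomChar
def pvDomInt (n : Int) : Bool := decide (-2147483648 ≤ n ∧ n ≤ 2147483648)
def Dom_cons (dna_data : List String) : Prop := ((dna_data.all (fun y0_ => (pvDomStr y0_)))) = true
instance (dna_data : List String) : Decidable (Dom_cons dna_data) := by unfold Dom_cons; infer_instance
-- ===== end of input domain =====

-- B drops A's four per-column counters: it sorts each column's letters and takes the consensus
-- as the first longest run of a sorted-runs scan (alternative decomposition, same task).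

-- ===== PORT A =====
-- A's inner loop body over the sequences for column i (the four counters as a tuple)
def consStep (i : Int) (st : Int × Int × Int × Int) (seq : String) : Int × Int × Int × Int :=
  match st with
  | (idxA, idxC, idxG, idxT) =>
    if PySem.Str.pyGet? seq i = some 'A' then (idxA + 1, idxC, idxG, idxT)
    else if PySem.Str.pyGet? seq i = some 'C' then (idxA, idxC + 1, idxG, idxT)
    else if PySem.Str.pyGet? seq i = some 'G' then (idxA, idxC, idxG + 1, idxT)
    else if PySem.Str.pyGet? seq i = some 'T' then (idxA, idxC, idxG, idxT + 1)
    else (idxA, idxC, idxG, idxT)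
  -- seq[i] raising IndexError (pyGet? = none) is excluded by Pre_cons

def consColumn (dna_data : List String) (i : Int) : Int × Int × Int × Int :=
  dna_data.foldl (consStep i) (0, 0, 0, 0)

-- max_count = max(idxA,idxC,idxG,idxT), then the if/elif chain choosing the appended letter
def consLetter (st : Int × Int × Int × Int) : Char :=
  match st with
  | (idxA, idxC, idxG, idxT) =>
    let max_count := max (max (max idxA idxC) idxG) idxT
    if max_count = idxA then 'A'
    else if max_count = idxC then 'C'
    else if max_count = idxG then 'G'
    else 'T'

def cons (dna_data : List String) : String :=
  let seq_lenght : Int := PySem.Str.len (dna_data.headD "")  -- dna_data[0]; the empty list raises, excluded by Pre_cons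
  let consensus : List Char :=
    (PySem.List.pyRange 0 seq_lenght 1).foldl
      (fun consensus i => consensus ++ [consLetter (consColumn dna_data i)]) []
  String.ofList consensus

-- ===== PORT B =====
-- the generator 'seq[i] for seq in dna_data if seq[i] in "ACGT"', sorted;
-- 'seq[i] in "ACGT"' is the substring test PySem.Str.isIn on the one-char string
-- (seq[i] raising IndexError (pyGet? = none) is excluded by Pre_cons; the ' ' default is filtered out)
def colOf (dna_data : List String) (i : Int) : List Char :=
  PySem.List.sorted
    (dna_data.filterMap (fun seq =>
      let c := (PySem.Str.pyGet? seq i).getD ' '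
      if PySem.Str.isIn (String.ofList [c]) "ACGT" then some c else none))
    (fun c => c) false

-- one iteration of _mode's loop: update (cur, cur_run), then (best, best_run) on a strictly longer run
def modeStep (st : Char × Int × Option Char × Int) (c : Char) : Char × Int × Option Char × Int :=
  match st with
  | (best, bestRun, cur, curRun) =>
    let p : Option Char × Int := if some c = cur then (cur, curRun + 1) else (some c, 1)
    if p.2 > bestRun then (c, p.2, p.1, p.2) else (best, bestRun, p.1, p.2)

def pyMode (col : List Char) : Char :=
  (col.foldl modeStep ('A', 0, none, 0)).1

def cons_alt (dna_data : List String) : String :=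
  let seq_length : Int := PySem.Str.len (dna_data.headD "")
  let letters : List Char :=
    (PySem.List.pyRange 0 seq_length 1).foldl
      (fun letters i => letters ++ [pyMode (colOf dna_data i)]) []
  String.ofList letters

-- ===== PRECONDITION & SPEC =====
-- Pre_ excludes exactly the inputs on which A raises IndexError: the empty list (dna_data[0])
-- and inputs containing a sequence shorter than the first one (seq[i]).
def Pre_cons (dna_data : List String) : Prop :=
  dna_data ≠ [] ∧ ∀ s ∈ dna_data, (dna_data.headD "").toList.length ≤ s.toList.length
instance (dna_data : List String) : Decidable (Pre_cons dna_data) := by unfold Pre_cons; infer_instance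
def pvWitness_cons : List String := ["ACGT", "AGGT", "TGCA"]

def Spec_cons (dna_data : List String) (out : String) : Prop := out = cons_alt dna_data
instance (dna_data : List String) (out : String) : Decidable (Spec_cons dna_data out) := by unfold Spec_cons; infer_instance

-- ===== CLAIM (what is proved, stated in full; the proofs are below) =====
def Claim_equal_cons : Prop := ∀ (dna_data : List String), Dom_cons dna_data → Pre_cons dna_data → Spec_cons dna_data (cons dna_data)

-- ===== LEMMAS AND PROOFS =====

-- the column's characters (raising positions as ' ', which neither port counts)
def colChars (dna_data : List String) (i : Int) : List Char :=
  dna_data.map (fun s => (PySem.Str.pyGet? s i).getD ' ')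

def cIn (c : Char) : Bool := c == 'A' || c == 'C' || c == 'G' || c == 'T'

def charStep (st : Int × Int × Int × Int) (c : Char) : Int × Int × Int × Int :=
  match st with
  | (a, cc, g, t) =>
    if c = 'A' then (a + 1, cc, g, t)
    else if c = 'C' then (a, cc + 1, g, t)
    else if c = 'G' then (a, cc, g + 1, t)
    else if c = 'T' then (a, cc, g, t + 1)
    else (a, cc, g, t)

theorem consStep_eq_charStep (i : Int) (st : Int × Int × Int × Int) (s : String) :
    consStep i st s = charStep st ((PySem.Str.pyGet? s i).getD ' ') := by
  obtain ⟨a, c, g, t⟩ := st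
  rcases h : PySem.List.pyGet? s.toList i with _ | ch
  · simp [consStep, charStep, h]
  · simp [consStep, charStep, h]

theorem foldl_charStep_count (cs : List Char) : ∀ st : Int × Int × Int × Int,
    cs.foldl charStep st =
      (st.1 + cs.count 'A', st.2.1 + cs.count 'C', st.2.2.1 + cs.count 'G', st.2.2.2 + cs.count 'T') := by
  induction cs with
  | nil => intro st; simp
  | cons c cs ih =>
    intro st
    obtain ⟨a, cc, g, t⟩ := st
    rw [List.foldl_cons, ih]
    by_cases hA : c = 'A'
    · subst hA; simp [charStep]; ring
    · by_cases hC : c = 'C'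
      · subst hC; simp [charStep, hA]; ring
      · by_cases hG : c = 'G'
        · subst hG; simp [charStep, hA, hC]; ring
        · by_cases hT : c = 'T'
          · subst hT; simp [charStep, hA, hC, hG]; ring
          · simp [charStep, hA, hC, hG, hT]

theorem consColumn_counts (dna_data : List String) (i : Int) :
    consColumn dna_data i =
      (((colChars dna_data i).count 'A' : Int), ((colChars dna_data i).count 'C' : Int),
       ((colChars dna_data i).count 'G' : Int), ((colChars dna_data i).count 'T' : Int)) := by
  rw [consColumn]
  have h1 : dna_data.foldl (consStep i) (0, 0, 0, 0) =
      (colChars dna_data i).foldl charStep (0, 0, 0, 0) := by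
    rw [colChars, List.foldl_map]
    apply PySem.List.foldl_congr_mem
    intro st s _
    exact consStep_eq_charStep i st s
  rw [h1, foldl_charStep_count]
  simp

theorem isIn_singleton (c : Char) :
    PySem.Str.isIn (String.ofList [c]) "ACGT" = cIn c := by
  by_cases h : cIn c = true
  · rw [h, PySem.Str.isIn_iff_infix]
    simp only [cIn, Bool.or_eq_true, beq_iff_eq] at h
    rcases h with ((h | h) | h) | h <;> subst h <;> decide
  · have h' := h
    rw [Bool.not_eq_true] at h'
    rw [h', ← Bool.not_eq_true, PySem.Str.isIn_iff_infix]
    intro hinf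
    apply h
    have hmem : c ∈ "ACGT".toList := hinf.subset (by simp)
    have h4 : c = 'A' ∨ c = 'C' ∨ c = 'G' ∨ c = 'T' := by
      simpa [show ("ACGT".toList : List Char) = ['A', 'C', 'G', 'T'] from by decide] using hmem
    rcases h4 with h4 | h4 | h4 | h4 <;> subst h4 <;> rfl

theorem filterMap_filter {α : Type} (f : α → Char) (l : List α) :
    l.filterMap (fun s => if cIn (f s) then some (f s) else none) = (l.map f).filter cIn := by
  induction l with
  | nil => rfl
  | cons s rest ih =>
    rw [List.filterMap_cons, List.map_cons, List.filter_cons]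
    cases hc : cIn (f s)
    · simp only [ih]; simp
    · simp only [ih]; simp

theorem filterMap_eq_filter_colChars (dna_data : List String) (i : Int) :
    dna_data.filterMap (fun seq =>
        let c := (PySem.Str.pyGet? seq i).getD ' '
        if PySem.Str.isIn (String.ofList [c]) "ACGT" then some c else none)
      = (colChars dna_data i).filter cIn := by
  have hfun : (fun seq =>
        let c := (PySem.Str.pyGet? seq i).getD ' '
        if PySem.Str.isIn (String.ofList [c]) "ACGT" then some c else none)
      = (fun seq => if cIn ((PySem.Str.pyGet? seq i).getD ' ')
          then some ((PySem.Str.pyGet? seq i).getD ' ') else none) := by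
    funext s
    show (if PySem.Str.isIn (String.ofList [(PySem.Str.pyGet? s i).getD ' ']) "ACGT"
        then some ((PySem.Str.pyGet? s i).getD ' ') else none) = _
    rw [isIn_singleton]
  rw [hfun, filterMap_filter (fun s => (PySem.Str.pyGet? s i).getD ' '), colChars]

def repACGT (a c g t : Nat) : List Char :=
  List.replicate a 'A' ++ List.replicate c 'C' ++ List.replicate g 'G' ++ List.replicate t 'T'

theorem pairwise_repACGT (a c g t : Nat) : (repACGT a c g t).Pairwise (· ≤ ·) := by
  simp only [repACGT, List.pairwise_append, List.mem_append, List.mem_replicate]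
  repeat' apply And.intro
  all_goals first
    | exact List.pairwise_replicate_of_refl
    | (intro x hx y hy
       obtain ⟨_, rfl⟩ := hy
       first
         | (rcases hx with (⟨_, rfl⟩ | ⟨_, rfl⟩) | ⟨_, rfl⟩ <;> decide)
         | (rcases hx with ⟨_, rfl⟩ | ⟨_, rfl⟩ <;> decide)
         | (obtain ⟨_, rfl⟩ := hx; decide))

theorem sorted_eq_rep (ys : List Char) (h : ∀ c ∈ ys, cIn c = true) :
    PySem.List.sorted ys (fun c => c) false =
      repACGT (ys.count 'A') (ys.count 'C') (ys.count 'G') (ys.count 'T') := by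
  apply PySem.List.sorted_id_eq_of_perm_of_pairwise _ _ _ (pairwise_repACGT _ _ _ _)
  rw [List.perm_iff_count]
  intro x
  by_cases hx : cIn x = true
  · simp only [cIn, Bool.or_eq_true, beq_iff_eq] at hx
    rcases hx with ((hx | hx) | hx) | hx <;> subst hx <;>
      simp [repACGT, List.count_append, List.count_replicate]
  · have hx' : x ∉ ys := fun hmem => hx (h x hmem)
    rw [List.count_eq_zero_of_not_mem hx']
    simp only [cIn, Bool.or_eq_true, beq_iff_eq, not_or] at hx
    obtain ⟨⟨⟨h1, h2⟩, h3⟩, h4⟩ := hx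
    simp [repACGT, List.count_append, List.count_replicate,
      Ne.symm h1, Ne.symm h2, Ne.symm h3, Ne.symm h4]

theorem count_filter_cIn (cs : List Char) (x : Char) (hx : cIn x = true) :
    (cs.filter cIn).count x = cs.count x := by
  rw [List.count_filter]
  simp [hx]

theorem colOf_eq_rep (dna_data : List String) (i : Int) :
    colOf dna_data i =
      repACGT ((colChars dna_data i).count 'A') ((colChars dna_data i).count 'C')
              ((colChars dna_data i).count 'G') ((colChars dna_data i).count 'T') := by
  rw [colOf, filterMap_eq_filter_colChars]
  rw [sorted_eq_rep _ (fun c hc => (List.mem_filter.mp hc).2)]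
  rw [count_filter_cIn _ _ (by decide), count_filter_cIn _ _ (by decide),
    count_filter_cIn _ _ (by decide), count_filter_cIn _ _ (by decide)]

-- a run of m more copies of the current letter ch
theorem mode_run (ch : Char) (m : Nat) : ∀ (best : Char) (br k : Int), k ≤ br →
    (List.replicate m ch).foldl modeStep (best, br, some ch, k) =
      ((if br < k + m then ch else best), max br (k + m), some ch, k + m) := by
  induction m with
  | zero =>
    intro best br k hk
    simp only [List.replicate, List.foldl_nil, Nat.cast_zero, add_zero]
    rw [if_neg (by omega), max_eq_left (by omega)]
  | succ m ih =>
    intro best br k hk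
    rw [List.replicate_succ, List.foldl_cons]
    have hms : modeStep (best, br, some ch, k) ch =
        if k + 1 > br then (ch, k + 1, some ch, k + 1) else (best, br, some ch, k + 1) := by
      simp [modeStep]
    rw [hms]
    have harith : k + 1 + (m : Int) = k + ((m + 1 : Nat) : Int) := by push_cast; ring
    by_cases hgt : k + 1 > br
    · rw [if_pos hgt, ih ch (k + 1) (k + 1) le_rfl, harith]
      rw [ite_self, if_pos (by push_cast; omega), max_eq_right (by push_cast; omega),
        max_eq_right (by push_cast; omega)]
    · rw [if_neg hgt, ih best br (k + 1) (by omega), harith]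

-- a whole block of n copies of a letter ch different from the current one
theorem mode_block (ch : Char) (n : Nat) (best : Char) (br : Int) (cur : Option Char) (cr : Int)
    (hcur : cur ≠ some ch) (hbr : 0 ≤ br) :
    (List.replicate n ch).foldl modeStep (best, br, cur, cr) =
      ((if br < n then ch else best), max br n,
       (if n = 0 then cur else some ch), (if n = 0 then cr else (n : Int))) := by
  cases n with
  | zero =>
    simp only [List.replicate, List.foldl_nil, Nat.cast_zero, if_true]
    rw [if_neg (by omega), max_eq_left (by omega)]
  | succ m =>
    rw [List.replicate_succ, List.foldl_cons]
    have hms : modeStep (best, br, cur, cr) ch =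
        if 1 > br then (ch, 1, some ch, 1) else (best, br, some ch, 1) := by
      simp [modeStep, if_neg (Ne.symm hcur)]
    have hm : ¬ (m + 1 = 0) := by omega
    rw [hms, if_neg hm, if_neg hm]
    have harith : 1 + (m : Int) = ((m + 1 : Nat) : Int) := by push_cast; ring
    by_cases h1 : 1 > br
    · rw [if_pos h1, mode_run ch m ch 1 1 le_rfl, harith]
      rw [ite_self, if_pos (by push_cast; omega), max_eq_right (by push_cast; omega),
        max_eq_right (by push_cast; omega)]
    · rw [if_neg h1, mode_run ch m best br 1 (by omega), harith]

theorem mode_rep (a c g t : Nat) :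
    pyMode (repACGT a c g t) = consLetter ((a : Int), (c : Int), (g : Int), (t : Int)) := by
  rw [pyMode, repACGT, List.foldl_append, List.foldl_append, List.foldl_append]
  rw [mode_block 'A' a 'A' 0 none 0 (by simp) le_rfl]
  rw [mode_block 'C' c _ _ _ _ (by split_ifs <;> simp) (le_max_left 0 _)]
  rw [mode_block 'G' g _ _ _ _ (by split_ifs <;> simp) (le_trans (le_max_left 0 _) (le_max_left _ _))]
  rw [mode_block 'T' t _ _ _ _ (by split_ifs <;> simp)
    (le_trans (le_trans (le_max_left 0 _) (le_max_left _ _)) (le_max_left _ _))]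
  rw [consLetter]
  split_ifs <;> first | rfl | omega

theorem column_eq (dna_data : List String) (i : Int) :
    pyMode (colOf dna_data i) = consLetter (consColumn dna_data i) := by
  rw [colOf_eq_rep, consColumn_counts, mode_rep]

theorem cons_eq_alt (dna_data : List String) : cons dna_data = cons_alt dna_data := by
  simp only [cons, cons_alt]
  rw [PySem.List.foldl_append_singleton_eq_map, PySem.List.foldl_append_singleton_eq_map]
  exact congrArg String.ofList (congrArg _ (List.map_congr_left
    (fun i _ => (column_eq dna_data i).symm)))

-- ===== VERDICT (by name: the statement is the Claim_ definition above) =====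
theorem cons_spec : Claim_equal_cons := by
  intro dna_data _ _
  exact cons_eq_alt dna_data
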